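-- pv_equiv track=rewrite | github.com/suriya-3108/60-DAYS-STRONG-IN-DSA | WEEK-3/DAY-18/QUESTION-4.py | calc
-- ===== SOURCE A (Python) =====
-- def calc(a, b):
--     if b == 0:
--         return 1
--
--     half = calc(a, b//2)
--
--     if b % 2 == 0:
--         return half * half
--     else:
--         return a * half * half
-- ===== SOURCE B (Python) =====
-- def calc(a, b):
--     result = 1
--     base = a
--     while b != 0:
--         if b % 2:
--             result *= base
--         base *= base
--         b //= 2
--     return result
-- ===== Notes on version B (the rewrite author's own statement) =====
-- stated objective: alternative
-- what changed: Replaced recursive top-down squaring with an iterative bottom-up loop over the exponent's bits (result/base accumulators, no recursion).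
-- outside the precondition, e.g. on calc(2, -1): A raises RecursionError, B does not finish within the time limit
import Mathlib
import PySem

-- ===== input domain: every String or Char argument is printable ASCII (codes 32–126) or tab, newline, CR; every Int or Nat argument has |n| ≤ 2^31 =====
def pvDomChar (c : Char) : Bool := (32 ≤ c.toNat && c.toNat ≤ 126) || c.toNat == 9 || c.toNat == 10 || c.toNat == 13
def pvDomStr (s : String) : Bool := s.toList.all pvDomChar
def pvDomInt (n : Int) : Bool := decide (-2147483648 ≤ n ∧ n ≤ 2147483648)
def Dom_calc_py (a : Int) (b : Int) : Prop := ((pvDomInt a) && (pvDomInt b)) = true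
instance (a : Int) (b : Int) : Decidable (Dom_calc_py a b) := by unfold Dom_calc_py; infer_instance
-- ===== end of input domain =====

-- B replaces A's recursive top-down squaring with an iterative bottom-up loop over the exponent's bits (alternative decomposition, same multiplication count).


-- ===== PORT A =====
-- Literal port of A's recursion; for b < 0 the Python recurses forever (RecursionError),
-- which Pre_ excludes — the `b ≤ 0` guard only makes the Lean function total there.
def calc_py (a : Int) (b : Int) : Int :=
  if _h : b ≤ 0 then 1
  else
    let half := calc_py a (PySem.Int.floordiv b 2)
    if PySem.Int.mod b 2 == 0 then half * half else a * half * half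
termination_by b.toNat
decreasing_by
  have h2 : PySem.Int.floordiv b 2 = b / 2 := PySem.Int.floordiv_eq_ediv_of_pos (by omega)
  omega

-- ===== PORT B =====
-- Literal port of B's while-loop (state: result, base, b); the `b ≤ 0` guard makes
-- it total where the Python loop does not terminate (b < 0, excluded by Pre_).
def calcAltLoop (result : Int) (base : Int) (b : Int) : Int :=
  if _h : b ≤ 0 then result
  else
    calcAltLoop (if PySem.Int.mod b 2 == 0 then result else result * base)
      (base * base) (PySem.Int.floordiv b 2)
termination_by b.toNat
decreasing_by
  have h2 : PySem.Int.floordiv b 2 = b / 2 := PySem.Int.floordiv_eq_ediv_of_pos (by omega)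
  omega

def calc_py_alt (a : Int) (b : Int) : Int := calcAltLoop 1 a b

-- ===== PRECONDITION & SPEC =====
-- Pre_ excludes b < 0: there Python A recurses forever (RecursionError) and Python B's loop never exits.
def Pre_calc_py (a : Int) (b : Int) : Prop := 0 ≤ b
instance (a : Int) (b : Int) : Decidable (Pre_calc_py a b) := by unfold Pre_calc_py; infer_instance
def pvWitness_calc_py : Int × Int := (2, 5)
def Spec_calc_py (a : Int) (b : Int) (out : Int) : Prop := out = calc_py_alt a b
instance (a : Int) (b : Int) (out : Int) : Decidable (Spec_calc_py a b out) := by unfold Spec_calc_py; infer_instance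

-- ===== CLAIM (what is proved, stated in full; the proofs are below) =====
def Claim_equal_calc_py : Prop := ∀ (a : Int) (b : Int), Dom_calc_py a b → Pre_calc_py a b → Spec_calc_py a b (calc_py a b)

-- ===== LEMMAS AND PROOFS =====

theorem floordiv_two_toNat (b : Int) (hb : 0 < b) :
    (PySem.Int.floordiv b 2).toNat = b.toNat / 2 := by
  have h2 : PySem.Int.floordiv b 2 = b / 2 := PySem.Int.floordiv_eq_ediv_of_pos (by omega)
  rw [h2]; omega

theorem mod_two_toNat (b : Int) (hb : 0 < b) :
    PySem.Int.mod b 2 = (b.toNat % 2 : Nat) := by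
  have h2 : PySem.Int.mod b 2 = b % 2 := PySem.Int.mod_eq_emod_of_pos (by omega)
  rw [h2]; omega

theorem pow_split (a : Int) (n : Nat) : a ^ n = a ^ (n / 2) * a ^ (n / 2) * a ^ (n % 2) := by
  rw [← pow_add, ← pow_add]; congr 1; omega

theorem calc_py_pow (a : Int) (b : Int) (hb : 0 ≤ b) : calc_py a b = a ^ b.toNat := by
  by_cases h : b ≤ 0
  · have : b = 0 := le_antisymm h hb
    subst this; rw [calc_py]; simp
  · have hpos : 0 < b := by omega
    have hb2 : 0 ≤ PySem.Int.floordiv b 2 := by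
      have h2 : PySem.Int.floordiv b 2 = b / 2 := PySem.Int.floordiv_eq_ediv_of_pos (by omega)
      rw [h2]; omega
    have ih := calc_py_pow a (PySem.Int.floordiv b 2) hb2
    rw [calc_py, dif_neg h, ih, floordiv_two_toNat b hpos, mod_two_toNat b hpos]
    set n := b.toNat with hn
    by_cases hpar : n % 2 = 0
    · simp only [hpar, Nat.cast_zero, beq_self_eq_true, if_true]
      rw [pow_split a n, hpar, pow_zero, mul_one]
    · have h1 : n % 2 = 1 := by omega
      simp only [h1, Nat.cast_one, show ((1 : Int) == 0) = false from by decide, Bool.false_eq_true, if_false]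
      rw [pow_split a n, h1, pow_one]; ring
termination_by b.toNat
decreasing_by
  have h2 : PySem.Int.floordiv b 2 = b / 2 := PySem.Int.floordiv_eq_ediv_of_pos (by omega)
  omega

theorem calcAltLoop_pow (result base : Int) (b : Int) (hb : 0 ≤ b) :
    calcAltLoop result base b = result * base ^ b.toNat := by
  by_cases h : b ≤ 0
  · have : b = 0 := le_antisymm h hb
    subst this; rw [calcAltLoop]; simp
  · have hpos : 0 < b := by omega
    have hb2 : 0 ≤ PySem.Int.floordiv b 2 := by
      have h2 : PySem.Int.floordiv b 2 = b / 2 := PySem.Int.floordiv_eq_ediv_of_pos (by omega)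
      rw [h2]; omega
    have ih := calcAltLoop_pow
      (if PySem.Int.mod b 2 == 0 then result else result * base) (base * base)
      (PySem.Int.floordiv b 2) hb2
    rw [calcAltLoop, dif_neg h, ih, floordiv_two_toNat b hpos, mod_two_toNat b hpos]
    set n := b.toNat with hn
    by_cases hpar : n % 2 = 0
    · simp only [hpar, Nat.cast_zero, beq_self_eq_true, if_true]
      rw [mul_pow, pow_split base n, hpar, pow_zero, mul_one]
    · have h1 : n % 2 = 1 := by omega
      simp only [h1, Nat.cast_one, show ((1 : Int) == 0) = false from by decide, Bool.false_eq_true, if_false]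
      rw [mul_pow, pow_split base n, h1, pow_one]; ring
termination_by b.toNat
decreasing_by
  have h2 : PySem.Int.floordiv b 2 = b / 2 := PySem.Int.floordiv_eq_ediv_of_pos (by omega)
  omega

-- ===== VERDICT (by name: the statement is the Claim_ definition above) =====
theorem calc_py_spec : Claim_equal_calc_py := by
  intro a b _ hpre
  unfold Spec_calc_py calc_py_alt
  rw [calc_py_pow a b hpre, calcAltLoop_pow 1 a b hpre, one_mul]
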